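-- pv_equiv track=rewrite | github.com/krvavizmaj/codechallenges | src/codesignal/ChangeRoot.py | changeRoot
-- ===== SOURCE A (Python) =====
-- def changeRoot(parent, newRoot):
--     newParent = parent.copy()
--
--     newParent[newRoot] = newRoot
--     root = newRoot
--     while parent[root] != root:
--         root = parent[root]
--         newParent[root] = newRoot
--         newRoot = root
--
--     return newParent
-- ===== SOURCE B (Python) =====
-- def changeRoot(parent, newRoot):
--     # Phase 1: collect the path from newRoot up to the old root.
--     path = [newRoot]
--     r = newRoot
--     while parent[r] != r:
--         r = parent[r]
--         path.append(r)
--     # Phase 2: copy and reverse the edges along that path.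
--     newParent = parent.copy()
--     newParent[path[0]] = path[0]
--     for child, par in zip(path[1:], path):
--         newParent[child] = par
--     return newParent
-- ===== Notes on version B (the rewrite author's own statement) =====
-- stated objective: alternative
-- what changed: B splits A's single fused walk into two phases: it first materialises the explicit newRoot-to-root path as a list, then in a separate pass copies parent and reverses each edge along that path via zip(path[1:], path), instead of rewriting newParent while walking.
import Mathlib
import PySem

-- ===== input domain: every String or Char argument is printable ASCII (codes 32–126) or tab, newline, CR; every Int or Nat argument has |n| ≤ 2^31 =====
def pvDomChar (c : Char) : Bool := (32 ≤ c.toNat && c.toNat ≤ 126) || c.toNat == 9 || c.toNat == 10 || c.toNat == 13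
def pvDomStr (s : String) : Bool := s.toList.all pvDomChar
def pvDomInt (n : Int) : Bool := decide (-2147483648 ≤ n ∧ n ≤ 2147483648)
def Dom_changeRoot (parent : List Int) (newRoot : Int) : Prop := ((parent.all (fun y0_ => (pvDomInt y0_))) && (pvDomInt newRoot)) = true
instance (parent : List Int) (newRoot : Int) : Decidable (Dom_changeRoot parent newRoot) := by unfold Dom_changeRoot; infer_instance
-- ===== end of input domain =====

-- B re-roots by first materialising the newRoot→root path, then reversing its edges in a
-- second pass (alternative decomposition of A's fused walk); return values proved equal.


-- ===== PORT A =====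
-- A's while loop, threading (newParent, root, newRoot); fuel = parent.length suffices on
-- every input admitted by Pre_changeRoot.  pyGet? none = IndexError: outside Pre_, and
-- pySetD's fallback is likewise only reached outside Pre_.
def chLoopA (parent : List Int) : Nat → List Int → Int → Int → List Int
  | 0, newParent, _, _ => newParent
  | fuel + 1, newParent, root, newRoot =>
    match PySem.List.pyGet? parent root with
    | none => newParent                      -- IndexError in Python; outside Pre_
    | some p =>
      if p ≠ root then
        chLoopA parent fuel (PySem.List.pySetD newParent p newRoot) p p
      else newParent

def changeRoot (parent : List Int) (newRoot : Int) : List Int :=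
  let newParent := parent                    -- parent.copy()
  let newParent := PySem.List.pySetD newParent newRoot newRoot   -- newParent[newRoot] = newRoot
  chLoopA parent parent.length newParent newRoot newRoot

-- ===== PORT B =====
-- B's first while loop: the nodes appended to 'path' after its head (fuel as above).
def bSteps (parent : List Int) : Nat → Int → List Int
  | 0, _ => []
  | fuel + 1, r =>
    match PySem.List.pyGet? parent r with
    | none => []                             -- IndexError in Python; outside Pre_
    | some p => if p ≠ r then p :: bSteps parent fuel p else []

def changeRoot_alt (parent : List Int) (newRoot : Int) : List Int :=
  let path := newRoot :: bSteps parent parent.length newRoot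
  let newParent := parent                    -- parent.copy()
  let newParent := PySem.List.pySetD newParent path.headI path.headI   -- newParent[path[0]] = path[0]
  ((path.drop 1).zip path).foldl (fun np cp => PySem.List.pySetD np cp.1 cp.2) newParent

-- ===== PRECONDITION & SPEC =====
-- Pre_ = exactly the inputs on which Python's A returns: every node visited by the walk
-- (the iterates of the parent step, Python-normalised by floor-mod) is a valid Python index
-- and the walk reaches a self-loop (otherwise A raises IndexError or loops forever).
def pvStep (parent : List Int) (r : Int) : Int :=
  parent.getD (PySem.Int.mod r parent.length).toNat 0

def Pre_changeRoot (parent : List Int) (newRoot : Int) : Prop :=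
  (∀ k : Nat, k ≤ parent.length →
      -(parent.length : Int) ≤ (pvStep parent)^[k] newRoot ∧
      (pvStep parent)^[k] newRoot < (parent.length : Int)) ∧
  pvStep parent ((pvStep parent)^[parent.length] newRoot) = (pvStep parent)^[parent.length] newRoot

instance (parent : List Int) (newRoot : Int) : Decidable (Pre_changeRoot parent newRoot) := by
  unfold Pre_changeRoot; infer_instance

def pvWitness_changeRoot : List Int × Int := ([0, 0, 1], 2)

def Spec_changeRoot (parent : List Int) (newRoot : Int) (out : List Int) : Prop := out = changeRoot_alt parent newRoot
instance (parent : List Int) (newRoot : Int) (out : List Int) : Decidable (Spec_changeRoot parent newRoot out) := by unfold Spec_changeRoot; infer_instance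

-- ===== CLAIM (what is proved, stated in full; the proofs are below) =====
def Claim_equal_changeRoot : Prop := ∀ (parent : List Int) (newRoot : Int), Dom_changeRoot parent newRoot → Pre_changeRoot parent newRoot → Spec_changeRoot parent newRoot (changeRoot parent newRoot)

-- ===== LEMMAS AND PROOFS =====

-- A's fused walk equals B's "build the path, then fold the reversed edges" pass,
-- for ANY fuel, start node and accumulator.
theorem chLoopA_eq_fold (parent : List Int) :
    ∀ (fuel : Nat) (r : Int) (np : List Int),
      chLoopA parent fuel np r r =
        ((bSteps parent fuel r).zip (r :: bSteps parent fuel r)).foldl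
          (fun np cp => PySem.List.pySetD np cp.1 cp.2) np := by
  intro fuel
  induction fuel with
  | zero => intro r np; rfl
  | succ fuel ih =>
    intro r np
    simp only [chLoopA, bSteps]
    cases h : PySem.List.pyGet? parent r with
    | none => rfl
    | some p =>
      by_cases hp : p ≠ r
      · simp only [if_pos hp, List.zip, List.zipWith, List.foldl]
        exact ih p (PySem.List.pySetD np p r)
      · simp [if_neg hp]

theorem changeRoot_eq_alt (parent : List Int) (newRoot : Int) :
    changeRoot parent newRoot = changeRoot_alt parent newRoot := by
  unfold changeRoot changeRoot_alt
  simp only [List.headI, List.drop_one, List.tail_cons]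
  exact chLoopA_eq_fold parent parent.length newRoot (PySem.List.pySetD parent newRoot newRoot)

-- ===== VERDICT (by name: the statement is the Claim_ definition above) =====
theorem changeRoot_spec : Claim_equal_changeRoot := by
  intro parent newRoot _ _
  unfold Spec_changeRoot
  exact changeRoot_eq_alt parent newRoot
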